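-- pv_equiv track=rewrite | github.com/tikv/pd | .agents/skills/pd-ci-flaky-triage/scripts/triage_pd_ci_flaky.py | extract_json_array_after
-- ===== SOURCE A (Python) =====
-- def extract_json_array_after(text: str, marker: str) -> str | None:
--     idx = text.find(marker)
--     if idx < 0:
--         return None
--     start = text.find("[", idx)
--     if start < 0:
--         return None
--
--     in_string = False
--     escaped = False
--     depth = 0
--     for i in range(start, len(text)):
--         ch = text[i]
--         if in_string:
--             if escaped:
--                 escaped = False
--             elif ch == "\\":
--                 escaped = True
--             elif ch == '"':
--                 in_string = False
--             continue
--
--         if ch == '"':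
--             in_string = True
--             continue
--         if ch == "[":
--             depth += 1
--             continue
--         if ch == "]":
--             depth -= 1
--             if depth == 0:
--                 return text[start : i + 1]
--     return None
-- ===== SOURCE B (Python) =====
-- def _structural_brackets(sub: str) -> list[tuple[int, str]]:
--     """Pass 1: collect (index, char) for every '[' / ']' outside string literals."""
--     brackets = []
--     state = 0  # 0 = code, 1 = inside string, 2 = just after backslash
--     for i, ch in enumerate(sub):
--         if state == 2:
--             state = 1
--         elif state == 1:
--             if ch == "\\":
--                 state = 2
--             elif ch == '"':
--                 state = 0
--         elif ch == '"':
--             state = 1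
--         elif ch in "[]":
--             brackets.append((i, ch))
--     return brackets
--
--
-- def extract_json_array_after(text: str, marker: str) -> str | None:
--     idx = text.find(marker)
--     if idx < 0:
--         return None
--     start = text.find("[", idx)
--     if start < 0:
--         return None
--     sub = text[start:]
--     # Pass 2: running balance over the structural brackets only.
--     depth = 0
--     for i, ch in _structural_brackets(sub):
--         depth += 1 if ch == "[" else -1
--         if ch == "]" and depth == 0:
--             return sub[: i + 1]
--     return None
-- ===== Notes on version B (the rewrite author's own statement) =====
-- stated objective: alternative
-- what changed: Replaced A's single fused per-character state machine by two staged passes: a first pass materialises an intermediate list of the structural brackets (index, char) lying outside string literals, and a second, separate running-balance scan over that bracket list finds the closing bracket and slices.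
import Mathlib
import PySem

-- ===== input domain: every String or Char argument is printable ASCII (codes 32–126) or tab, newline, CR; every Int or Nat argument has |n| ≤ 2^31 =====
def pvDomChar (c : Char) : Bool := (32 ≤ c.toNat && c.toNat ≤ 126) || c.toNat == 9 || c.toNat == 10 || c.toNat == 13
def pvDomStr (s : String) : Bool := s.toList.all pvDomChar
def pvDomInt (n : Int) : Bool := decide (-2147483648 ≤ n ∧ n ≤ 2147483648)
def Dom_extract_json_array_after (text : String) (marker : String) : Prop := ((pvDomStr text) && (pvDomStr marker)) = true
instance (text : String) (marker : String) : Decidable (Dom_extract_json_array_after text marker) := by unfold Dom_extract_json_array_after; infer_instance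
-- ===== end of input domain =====

-- B replaces A's fused per-character state machine with two staged passes:
-- pass 1 materialises the list of structural brackets (index, char) outside string
-- literals; pass 2 is a separate running-balance scan over that list (objective:
-- alternative decomposition, same O(n) cost).

-- ===== PORT A =====
-- A's for-loop: state (in_string, escaped, depth), one character per step;
-- sub = text.toList.drop start, relative index j, so text[start : i+1] = sub.take (j+1).
def pvLoopA (sub : List Char) (rest : List Char) (j : Nat)
    (instr esc : Bool) (depth : Int) : Option String :=
  match rest with
  | [] => none
  | ch :: rs =>
    if instr then
      if esc then pvLoopA sub rs (j+1) true false depth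
      else if ch = '\\' then pvLoopA sub rs (j+1) true true depth
      else if ch = '"' then pvLoopA sub rs (j+1) false esc depth
      else pvLoopA sub rs (j+1) instr esc depth
    else if ch = '"' then pvLoopA sub rs (j+1) true esc depth
    else if ch = '[' then pvLoopA sub rs (j+1) instr esc (depth+1)
    else if ch = ']' then
      if depth - 1 = 0 then some (String.ofList (sub.take (j+1)))
      else pvLoopA sub rs (j+1) instr esc (depth-1)
    else pvLoopA sub rs (j+1) instr esc depth

def extract_json_array_after (text : String) (marker : String) : Option String :=
  let idx := PySem.Str.find text marker
  if idx < 0 then none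
  else
    let start := PySem.Str.findFrom text "[" idx
    if start < 0 then none
    else
      let sub := text.toList.drop start.toNat
      pvLoopA sub sub 0 false false 0

-- ===== PORT B =====
-- Pass 1 of Source B: collect (index, char) for '[' / ']' outside string literals;
-- state 0 = code, 1 = in string, 2 = just after backslash.
def pvBrackets (cs : List Char) (state : Nat) (i : Nat) : List (Nat × Char) :=
  match cs with
  | [] => []
  | ch :: rs =>
    if state = 2 then pvBrackets rs 1 (i+1)
    else if state = 1 then
      if ch = '\\' then pvBrackets rs 2 (i+1)
      else if ch = '"' then pvBrackets rs 0 (i+1)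
      else pvBrackets rs 1 (i+1)
    else if ch = '"' then pvBrackets rs 1 (i+1)
    else if ch = '[' ∨ ch = ']' then (i, ch) :: pvBrackets rs 0 (i+1)
    else pvBrackets rs 0 (i+1)

-- Pass 2 of Source B: running balance over the bracket list only.
def pvScan (sub : List Char) (bs : List (Nat × Char)) (depth : Int) : Option String :=
  match bs with
  | [] => none
  | (i, ch) :: rest =>
    let d := depth + (if ch = '[' then 1 else -1)
    if ch = ']' ∧ d = 0 then some (String.ofList (sub.take (i+1)))
    else pvScan sub rest d

def extract_json_array_after_alt (text : String) (marker : String) : Option String :=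
  let idx := PySem.Str.find text marker
  if idx < 0 then none
  else
    let start := PySem.Str.findFrom text "[" idx
    if start < 0 then none
    else
      let sub := text.toList.drop start.toNat
      pvScan sub (pvBrackets sub 0 0) 0

-- ===== PRECONDITION & SPEC =====
def Spec_extract_json_array_after (text : String) (marker : String) (out : Option String) : Prop := out = extract_json_array_after_alt text marker
instance (text : String) (marker : String) (out : Option String) : Decidable (Spec_extract_json_array_after text marker out) := by unfold Spec_extract_json_array_after; infer_instance

-- ===== CLAIM (what is proved, stated in full; the proofs are below) =====
def Claim_equal_extract_json_array_after : Prop := ∀ (text : String) (marker : String), Dom_extract_json_array_after text marker → Spec_extract_json_array_after text marker (extract_json_array_after text marker)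

-- ===== LEMMAS AND PROOFS =====

-- A's (instr, esc) state corresponds to B's numeric state: (false,false) ↦ 0, (true,false) ↦ 1, (true,true) ↦ 2.
theorem pvLoopA_eq_pvScan :
    ∀ (rest : List Char) (sub : List Char) (j : Nat) (depth : Int),
      pvLoopA sub rest j false false depth = pvScan sub (pvBrackets rest 0 j) depth ∧
      pvLoopA sub rest j true false depth = pvScan sub (pvBrackets rest 1 j) depth ∧
      pvLoopA sub rest j true true depth = pvScan sub (pvBrackets rest 2 j) depth := by
  intro rest
  induction rest with
  | nil => intro sub j depth; exact ⟨rfl, rfl, rfl⟩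
  | cons ch rs ih =>
    intro sub j depth
    refine ⟨?_, ?_, ?_⟩
    · -- state 0 (code)
      by_cases hq : ch = '"'
      · subst hq
        exact (rfl : pvLoopA sub ('"' :: rs) j false false depth =
            pvLoopA sub rs (j+1) true false depth).trans (ih sub (j+1) depth).2.1
      · by_cases hl : ch = '['
        · subst hl
          have hS : pvScan sub (pvBrackets ('[' :: rs) 0 j) depth =
              pvScan sub (pvBrackets rs 0 (j+1)) (depth+1) := by simp [pvBrackets, pvScan]
          exact ((rfl : pvLoopA sub ('[' :: rs) j false false depth =
            pvLoopA sub rs (j+1) false false (depth+1)).trans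
            (ih sub (j+1) (depth+1)).1).trans hS.symm
        · by_cases hr : ch = ']'
          · subst hr
            have hB : pvBrackets (']' :: rs) 0 j = (j, ']') :: pvBrackets rs 0 (j+1) := rfl
            by_cases hd : depth - 1 = 0
            · have hA : pvLoopA sub (']' :: rs) j false false depth =
                  some (String.ofList (sub.take (j+1))) := by
                simp [pvLoopA, hd]
              have hS : pvScan sub ((j, ']') :: pvBrackets rs 0 (j+1)) depth =
                  some (String.ofList (sub.take (j+1))) := by
                simp [pvScan, show depth + -1 = 0 by omega]
              rw [hA, hB, hS]
            · have hA : pvLoopA sub (']' :: rs) j false false depth =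
                  pvLoopA sub rs (j+1) false false (depth-1) := by simp [pvLoopA, hd]
              have hS : pvScan sub ((j, ']') :: pvBrackets rs 0 (j+1)) depth =
                  pvScan sub (pvBrackets rs 0 (j+1)) (depth-1) := by
                have h2 : depth + -1 = depth - 1 := by ring
                simp [pvScan, h2, hd]
              rw [hA, hB, hS]; exact (ih sub (j+1) (depth-1)).1
          · have hA : pvLoopA sub (ch :: rs) j false false depth =
                pvLoopA sub rs (j+1) false false depth := by simp [pvLoopA, hq, hl, hr]
            have hB : pvBrackets (ch :: rs) 0 j = pvBrackets rs 0 (j+1) := by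
              simp [pvBrackets, hq, hl, hr]
            rw [hA, hB]; exact (ih sub (j+1) depth).1
    · -- state 1 (in string)
      by_cases hb : ch = '\\'
      · subst hb
        exact (rfl : pvLoopA sub ('\\' :: rs) j true false depth =
            pvLoopA sub rs (j+1) true true depth).trans (ih sub (j+1) depth).2.2
      · by_cases hq : ch = '"'
        · subst hq
          exact (rfl : pvLoopA sub ('"' :: rs) j true false depth =
              pvLoopA sub rs (j+1) false false depth).trans (ih sub (j+1) depth).1
        · have hA : pvLoopA sub (ch :: rs) j true false depth =
              pvLoopA sub rs (j+1) true false depth := by simp [pvLoopA, hb, hq]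
          have hB : pvBrackets (ch :: rs) 1 j = pvBrackets rs 1 (j+1) := by
            simp [pvBrackets, hb, hq]
          rw [hA, hB]; exact (ih sub (j+1) depth).2.1
    · -- state 2 (after backslash)
      exact (rfl : pvLoopA sub (ch :: rs) j true true depth =
          pvLoopA sub rs (j+1) true false depth).trans (ih sub (j+1) depth).2.1

-- ===== VERDICT (by name: the statement is the Claim_ definition above) =====
theorem extract_json_array_after_spec : Claim_equal_extract_json_array_after := by
  intro text marker _
  unfold Spec_extract_json_array_after extract_json_array_after extract_json_array_after_alt
  simp only [PySem.Str.find_eq, PySem.Str.findFrom_eq]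
  split_ifs <;> try rfl
  exact (pvLoopA_eq_pvScan _ _ 0 0).1
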